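-- pv_equiv track=rewrite | github.com/NoOne1007/daily-code | problems/RepeatedCharacter.py | firstRep
-- ===== SOURCE A (Python) =====
-- import collections
--
-- def firstRep(s):
--     my_set = set()
--     my_dict = collections.Counter(s)
--     for i in my_dict.keys():
--         if my_dict[i] > 1:
--             my_set.add(i)
--
--     for i in s:
--         if i in my_set:
--             return i
--     return '#'
-- ===== SOURCE B (Python) =====
-- def firstRep(s):
--     seen = set()
--     ans = '#'
--     for c in reversed(s):
--         if c in seen:
--             ans = c
--         seen.add(c)
--     return ans
-- ===== Notes on version B (the rewrite author's own statement) =====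
-- stated objective: alternative
-- what changed: Replaces the Counter-then-rescan design with a single back-to-front pass carrying a seen-set: scanning reversed(s), whenever the current character was already seen (i.e. occurs later in s) it overwrites the answer, so the final answer is the first-by-position repeating character.
import Mathlib
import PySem

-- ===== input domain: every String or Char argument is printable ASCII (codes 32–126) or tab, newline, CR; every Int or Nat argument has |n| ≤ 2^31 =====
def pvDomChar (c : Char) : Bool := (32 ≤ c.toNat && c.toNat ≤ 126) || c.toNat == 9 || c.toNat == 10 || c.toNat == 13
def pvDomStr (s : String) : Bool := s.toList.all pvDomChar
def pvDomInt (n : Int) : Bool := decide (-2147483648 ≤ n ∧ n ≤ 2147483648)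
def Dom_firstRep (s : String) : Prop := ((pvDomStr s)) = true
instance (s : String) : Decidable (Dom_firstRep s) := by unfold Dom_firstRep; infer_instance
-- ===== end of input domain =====

-- B replaces A's Counter-and-rescan by one back-to-front pass with a seen-set (same value, different algorithm).

-- ===== PORT A =====
-- 'for i in s: if i in my_set: return i / return "#"'
def firstRepScan (mySet : PySem.Set Char) : List Char → String
  | [] => "#"
  | c :: rest => if PySem.Set.contains mySet c then String.ofList [c] else firstRepScan mySet rest

def firstRep (s : String) : String :=
  let myDict : PySem.Dict Char Int := PySem.Dict.counter s.toList
  let mySet : PySem.Set Char :=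
    myDict.keys.foldl (fun st k => if myDict.getD k 0 > 1 then PySem.Set.add st k else st) PySem.Set.empty
  firstRepScan mySet s.toList

-- ===== PORT B =====
-- 'for c in reversed(s): if c in seen: ans = c; seen.add(c)'
-- loop body of B's single pass (check 'c in seen' with the old seen, then add c)
def bStep (st : PySem.Set Char × String) (c : Char) : PySem.Set Char × String :=
  (PySem.Set.add st.1 c, if PySem.Set.contains st.1 c then String.ofList [c] else st.2)

def firstRep_alt (s : String) : String :=
  (s.toList.reverse.foldl bStep (PySem.Set.empty, "#")).2

-- ===== PRECONDITION & SPEC =====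
def Spec_firstRep (s : String) (out : String) : Prop := out = firstRep_alt s
instance (s : String) (out : String) : Decidable (Spec_firstRep s out) := by unfold Spec_firstRep; infer_instance

-- ===== CLAIM (what is proved, stated in full; the proofs are below) =====
def Claim_equal_firstRep : Prop := ∀ (s : String), Dom_firstRep s → Spec_firstRep s (firstRep s)

-- ===== LEMMAS AND PROOFS =====

-- proof-side reference: first c in ys with full.count c > 1, else "#"
def specScan (full : List Char) : List Char → String
  | [] => "#"
  | c :: rest => if full.count c > 1 then String.ofList [c] else specScan full rest

-- A's set contains exactly the characters occurring more than once in xs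
lemma mem_setOfDup (xs : List Char) (c : Char) :
    PySem.Set.contains
      ((PySem.Dict.counter xs).keys.foldl
        (fun st k => if (PySem.Dict.counter xs).getD k 0 > 1 then PySem.Set.add st k else st)
        PySem.Set.empty) c = (xs.count c > 1 : Bool) := by
  rw [PySem.List.foldl_ite_eq_foldl_filter,
      show (PySem.Set.empty : PySem.Set Char) = ([] : List Char) from rfl,
      ← PySem.Set.ofList_eq_foldl]
  simp [PySem.Set.contains, PySem.Dict.getD_counter, PySem.Dict.keys_counter,
        List.mem_filter, PySem.Set.mem_ofList]
  intro h
  exact List.count_pos_iff.mp (by omega)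

lemma a_scan_eq (xs : List Char) (mySet : PySem.Set Char)
    (h : ∀ c, PySem.Set.contains mySet c = (xs.count c > 1 : Bool)) :
    ∀ ys, firstRepScan mySet ys = specScan xs ys := by
  intro ys
  induction ys with
  | nil => rfl
  | cons c rest ih =>
      simp only [firstRepScan, specScan, h c, ih]
      by_cases hc : xs.count c > 1 <;> simp [hc]

-- what B's reverse fold computes, stated as a forward recursion
def revSpec (seen : PySem.Set Char) (ans : String) : List Char → String
  | [] => ans
  | c :: rest => if c ∈ seen ∨ c ∈ rest then String.ofList [c] else revSpec seen ans rest

lemma seen_of_foldr (xs : List Char) (st : PySem.Set Char × String) (d : Char) :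
    d ∈ (xs.foldr (fun c st => bStep st c) st).1 ↔ d ∈ st.1 ∨ d ∈ xs := by
  induction xs with
  | nil => simp
  | cons c rest ih =>
      simp only [List.foldr_cons, bStep, PySem.Set.mem_add, List.mem_cons]
      tauto

lemma foldr_eq_revSpec (xs : List Char) (st : PySem.Set Char × String) :
    (xs.foldr (fun c st => bStep st c) st).2 = revSpec st.1 st.2 xs := by
  induction xs generalizing st with
  | nil => rfl
  | cons c rest ih =>
      show (bStep (rest.foldr (fun c st => bStep st c) st) c).2 = _
      by_cases h : c ∈ st.1 ∨ c ∈ rest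
      · have hc : (rest.foldr (fun c st => bStep st c) st).1.contains c = true := by
          rw [PySem.Set.contains_iff, seen_of_foldr]; exact h
        simp only [bStep] at hc ⊢
        rw [hc]
        simp [revSpec, h]
      · have hc : (rest.foldr (fun c st => bStep st c) st).1.contains c = false := by
          rw [Bool.eq_false_iff, Ne, PySem.Set.contains_iff, seen_of_foldr]; exact h
        have ih' := ih st
        simp only [bStep] at hc ih' ⊢
        rw [hc]
        simp only [Bool.false_eq_true, if_false, revSpec, if_neg h, ih']

lemma revSpec_eq_specScan (xs : List Char) :
    ∀ ys pre, pre ++ ys = xs → (∀ d ∈ pre, d ∉ ys) →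
      revSpec PySem.Set.empty "#" ys = specScan xs ys := by
  intro ys
  induction ys with
  | nil => intro pre _ _; rfl
  | cons c rest ih =>
      intro pre hsplit hinv
      have hcpre : c ∉ pre := fun h => hinv c h (List.mem_cons_self ..)
      have hpre0 : pre.count c = 0 := List.count_eq_zero.mpr hcpre
      have hcount : xs.count c = pre.count c + (1 + rest.count c) := by
        rw [← hsplit]; simp [List.count_append]; omega
      simp only [revSpec, specScan]
      have hmemempty : ¬ c ∈ (PySem.Set.empty : PySem.Set Char) := by simp [PySem.Set.empty]
      by_cases hc : c ∈ rest
      · have : xs.count c > 1 := by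
          have := List.count_pos_iff.mpr hc; omega
        simp [hc, this]
      · have : ¬ xs.count c > 1 := by
          have := List.count_eq_zero.mpr hc; omega
        simp only [hmemempty, hc, or_self, this, if_false]
        exact ih (pre ++ [c]) (by simp [hsplit])
          (fun d hd => by
            rcases List.mem_append.mp hd with h | h
            · exact fun hdr => hinv d h (List.mem_cons_of_mem _ hdr)
            · simp at h; subst h; exact hc)

-- ===== VERDICT (by name: the statement is the Claim_ definition above) =====
theorem firstRep_spec : Claim_equal_firstRep := by
  intro s _
  unfold Spec_firstRep firstRep firstRep_alt
  rw [List.foldl_reverse, foldr_eq_revSpec,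
      a_scan_eq s.toList _ (fun c => mem_setOfDup s.toList c),
      revSpec_eq_specScan s.toList s.toList [] rfl (by simp)]
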